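-- pv_equiv track=rewrite | github.com/tomastc/Memoria_de_Titulo | 01 Codigos utilizados/01 Procesamiento_imagenes/05 Video_Apertura 2 instantes - ROI1 - FINAL.py | verificar_cruce_x470
-- ===== SOURCE A (Python) =====
-- def verificar_cruce_x470(secuencia, x_puntos, x_limit):
--     if len(secuencia) < 2:
--         return False
--     lados = []
--     for idx in secuencia:
--         x = x_puntos[idx]
--         lados.append(-1 if x < x_limit else 1)
--     for i in range(1, len(lados)):
--         if lados[i] != lados[i-1]:
--             return True
--     return False
-- ===== SOURCE B (Python) =====
-- def verificar_cruce_x470(secuencia, x_puntos, x_limit):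
--     if len(secuencia) < 2:
--         return False
--     seen = set()
--     for idx in secuencia:
--         seen.add(x_puntos[idx] < x_limit)
--         if len(seen) == 2:
--             return True
--     return False
-- ===== Notes on version B (the rewrite author's own statement) =====
-- stated objective: simpler
-- what changed: Instead of building a full lados list of -1/1 and then scanning adjacent pairs in a second loop, B makes one pass maintaining the set of sides seen and returns True as soon as both sides have appeared; the intermediate list and the second loop disappear.
import Mathlib
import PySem

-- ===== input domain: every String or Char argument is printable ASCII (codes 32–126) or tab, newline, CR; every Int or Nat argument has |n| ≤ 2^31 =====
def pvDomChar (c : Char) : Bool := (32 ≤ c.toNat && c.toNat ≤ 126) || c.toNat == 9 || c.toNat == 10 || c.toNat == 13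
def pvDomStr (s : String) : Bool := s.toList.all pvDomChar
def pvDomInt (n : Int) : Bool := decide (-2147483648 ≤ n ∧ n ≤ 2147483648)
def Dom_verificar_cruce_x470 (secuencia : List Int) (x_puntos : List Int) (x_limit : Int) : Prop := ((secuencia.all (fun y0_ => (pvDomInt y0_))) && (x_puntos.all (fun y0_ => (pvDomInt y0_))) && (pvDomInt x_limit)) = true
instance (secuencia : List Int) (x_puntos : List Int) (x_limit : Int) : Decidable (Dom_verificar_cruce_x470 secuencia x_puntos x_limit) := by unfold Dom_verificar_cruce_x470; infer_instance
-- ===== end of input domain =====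

-- B replaces A's two passes (build a -1/1 list, then scan adjacent pairs) with one pass
-- maintaining the set of sides seen, returning True as soon as both sides appear (objective: simpler).

-- ===== PORT A =====
-- first loop of A: build lados by appending -1/1 per index (pyGet? none = IndexError, excluded by Pre_)
def vcxLados (x_puntos : List Int) (x_limit : Int) (secuencia : List Int) : List Int :=
  secuencia.foldl (fun lados idx =>
    lados ++ [if (PySem.List.pyGet? x_puntos idx).getD 0 < x_limit then (-1 : Int) else 1]) []

-- second loop of A: for i in range(1, len(lados)): compare lados[i] with lados[i-1], early return True
def vcxScan : List Int → Bool
  | a :: b :: rest => if b != a then true else vcxScan (b :: rest)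
  | _ => false

def verificar_cruce_x470 (secuencia : List Int) (x_puntos : List Int) (x_limit : Int) : Bool :=
  if secuencia.length < 2 then false
  else vcxScan (vcxLados x_puntos x_limit secuencia)

-- ===== PORT B =====
-- B's single loop: add the side (x_puntos[idx] < x_limit) to the seen-set; True once len(seen)==2
def vcxAltLoop (x_puntos : List Int) (x_limit : Int) : List Int → PySem.Set Bool → Bool
  | [], _ => false
  | idx :: rest, seen =>
    let seen' := PySem.Set.add seen (decide ((PySem.List.pyGet? x_puntos idx).getD 0 < x_limit))
    if PySem.Set.len seen' == 2 then true else vcxAltLoop x_puntos x_limit rest seen'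

def verificar_cruce_x470_alt (secuencia : List Int) (x_puntos : List Int) (x_limit : Int) : Bool :=
  if secuencia.length < 2 then false
  else vcxAltLoop x_puntos x_limit secuencia PySem.Set.empty

-- ===== PRECONDITION & SPEC =====
-- Pre_ excludes exactly the inputs on which A raises IndexError: sequences of length ≥ 2
-- containing an index out of range for x_puntos (short sequences return False before indexing
-- and stay inside Pre_).
def Pre_verificar_cruce_x470 (secuencia : List Int) (x_puntos : List Int) (x_limit : Int) : Prop :=
  secuencia.length < 2 ∨ ∀ idx ∈ secuencia, PySem.Raise.InRange x_puntos.length idx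
instance (secuencia : List Int) (x_puntos : List Int) (x_limit : Int) : Decidable (Pre_verificar_cruce_x470 secuencia x_puntos x_limit) := by unfold Pre_verificar_cruce_x470; infer_instance

def pvWitness_verificar_cruce_x470 : List Int × List Int × Int := ([0, 1, -1], [450, 480], 470)

def Spec_verificar_cruce_x470 (secuencia : List Int) (x_puntos : List Int) (x_limit : Int) (out : Bool) : Prop := out = verificar_cruce_x470_alt secuencia x_puntos x_limit
instance (secuencia : List Int) (x_puntos : List Int) (x_limit : Int) (out : Bool) : Decidable (Spec_verificar_cruce_x470 secuencia x_puntos x_limit out) := by unfold Spec_verificar_cruce_x470; infer_instance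

-- ===== CLAIM (what is proved, stated in full; the proofs are below) =====
def Claim_equal_verificar_cruce_x470 : Prop := ∀ (secuencia : List Int) (x_puntos : List Int) (x_limit : Int), Dom_verificar_cruce_x470 secuencia x_puntos x_limit → Pre_verificar_cruce_x470 secuencia x_puntos x_limit → Spec_verificar_cruce_x470 secuencia x_puntos x_limit (verificar_cruce_x470 secuencia x_puntos x_limit)

-- ===== LEMMAS AND PROOFS =====

-- the side of point idx: True = left of x_limit
def vcxSide (x_puntos : List Int) (x_limit : Int) (idx : Int) : Bool :=
  decide ((PySem.List.pyGet? x_puntos idx).getD 0 < x_limit)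

-- the ±1 encoding A uses
def vcxPm (b : Bool) : Int := if b then -1 else 1

theorem vcxLados_eq (x_puntos : List Int) (x_limit : Int) (secuencia : List Int) :
    vcxLados x_puntos x_limit secuencia
      = secuencia.map (fun idx => vcxPm (vcxSide x_puntos x_limit idx)) := by
  suffices h : ∀ (acc : List Int), secuencia.foldl (fun lados idx =>
      lados ++ [if (PySem.List.pyGet? x_puntos idx).getD 0 < x_limit then (-1 : Int) else 1]) acc
      = acc ++ secuencia.map (fun idx => vcxPm (vcxSide x_puntos x_limit idx)) by
    simpa [vcxLados] using h []
  induction secuencia with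
  | nil => intro acc; simp
  | cons a t ih =>
    intro acc
    simp only [List.foldl_cons, List.map_cons, ih, vcxPm, vcxSide]
    by_cases h : (PySem.List.pyGet? x_puntos a).getD 0 < x_limit <;> simp [h]

theorem vcxScan_map (a : Bool) (l : List Bool) :
    vcxScan ((a :: l).map vcxPm) = l.any (fun b => b != a) := by
  induction l generalizing a with
  | nil => simp [vcxScan]
  | cons b t ih =>
    simp only [List.map_cons] at ih ⊢
    rw [List.any_cons]
    cases a <;> cases b
    · simpa [vcxPm] using ih false
    · simp [vcxScan, vcxPm]
    · simp [vcxScan, vcxPm]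
    · simpa [vcxPm] using ih true

theorem vcxAltLoop_one (x_puntos : List Int) (x_limit : Int) (l : List Int) (b : Bool) :
    vcxAltLoop x_puntos x_limit l [b]
      = l.any (fun idx => vcxSide x_puntos x_limit idx != b) := by
  induction l generalizing b with
  | nil => simp [vcxAltLoop]
  | cons a t ih =>
    rw [List.any_cons, vcxAltLoop]
    show (if PySem.Set.len (PySem.Set.add [b] (vcxSide x_puntos x_limit a)) == 2 then true
          else vcxAltLoop x_puntos x_limit t (PySem.Set.add [b] (vcxSide x_puntos x_limit a)))
        = ((vcxSide x_puntos x_limit a != b) || t.any fun idx => vcxSide x_puntos x_limit idx != b)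
    cases hs : vcxSide x_puntos x_limit a <;> cases b <;>
      simp [PySem.Set.add, PySem.Set.len, ih]

theorem vcxAltLoop_cons (x_puntos : List Int) (x_limit : Int) (a : Int) (t : List Int) :
    vcxAltLoop x_puntos x_limit (a :: t) PySem.Set.empty
      = t.any (fun idx => vcxSide x_puntos x_limit idx != vcxSide x_puntos x_limit a) := by
  rw [vcxAltLoop]
  show (if PySem.Set.len (PySem.Set.add PySem.Set.empty (vcxSide x_puntos x_limit a)) == 2 then true
        else vcxAltLoop x_puntos x_limit t (PySem.Set.add PySem.Set.empty (vcxSide x_puntos x_limit a)))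
      = t.any fun idx => vcxSide x_puntos x_limit idx != vcxSide x_puntos x_limit a
  cases hs : vcxSide x_puntos x_limit a <;>
    simp [PySem.Set.add, PySem.Set.empty, PySem.Set.len, vcxAltLoop_one]

-- ===== VERDICT (by name: the statement is the Claim_ definition above) =====
theorem verificar_cruce_x470_spec : Claim_equal_verificar_cruce_x470 := by
  intro secuencia x_puntos x_limit _ _
  unfold Spec_verificar_cruce_x470 verificar_cruce_x470 verificar_cruce_x470_alt
  match secuencia with
  | [] => simp
  | [a] => simp
  | a :: b :: t =>
    rw [if_neg (by simp), if_neg (by simp)]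
    rw [vcxLados_eq, vcxAltLoop_cons]
    rw [show (fun idx => vcxPm (vcxSide x_puntos x_limit idx))
        = vcxPm ∘ (vcxSide x_puntos x_limit) from rfl, ← List.map_map, List.map_cons, vcxScan_map]
    simp only [List.any_map]
    rfl
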